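-- pv_equiv track=rewrite | github.com/yaroslaff/ArgAlias | src/argalias/__init__.py | iterate_args
-- ===== SOURCE A (Python) =====
-- from typing import List, Tuple, Optional, Union
--
-- def iterate_args(args: List[str], skip_flags=False, nargs: dict = dict()):
--     skip_next = 0
--     for idx, arg in enumerate(args):
--         if skip_next > 0:
--             # skip this arg, it's argument to option
--             skip_next -= 1
--             continue
--
--         if arg in nargs:
--             skip_next = nargs[arg]
--             continue
--
--         if skip_flags and arg.startswith('-'):
--             continue
--         yield idx, arg
-- ===== SOURCE B (Python) =====
-- def consumed_mask(args, nargs):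
--     # stage 1: materialize a boolean mask marking every position consumed by an
--     # option name or by the option's following arguments
--     n = len(args)
--     mask = []
--     i = 0
--     while i < n:
--         arg = args[i]
--         if arg in nargs:
--             kk = min(max(0, nargs[arg]), n - i - 1)
--             mask.extend([True] * (1 + kk))
--             i += 1 + kk
--         else:
--             mask.append(False)
--             i += 1
--     return mask
--
--
-- def iterate_args(args, skip_flags=False, nargs: dict = dict()):
--     mask = consumed_mask(args, nargs)
--     # stage 2: emit the surviving positions, filtering flags
--     for idx, arg in enumerate(args):
--         if not mask[idx] and not (skip_flags and arg.startswith('-')):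
--             yield idx, arg
-- ===== Notes on version B (the rewrite author's own statement) =====
-- stated objective: alternative
-- what changed: Replaced A's single pass with a pending skip_next counter by two staged passes: first materialize a boolean mask of positions consumed by option names and their arguments (spans written in one step), then a separate enumerate pass that emits every unmasked, non-flag position.
import Mathlib
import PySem

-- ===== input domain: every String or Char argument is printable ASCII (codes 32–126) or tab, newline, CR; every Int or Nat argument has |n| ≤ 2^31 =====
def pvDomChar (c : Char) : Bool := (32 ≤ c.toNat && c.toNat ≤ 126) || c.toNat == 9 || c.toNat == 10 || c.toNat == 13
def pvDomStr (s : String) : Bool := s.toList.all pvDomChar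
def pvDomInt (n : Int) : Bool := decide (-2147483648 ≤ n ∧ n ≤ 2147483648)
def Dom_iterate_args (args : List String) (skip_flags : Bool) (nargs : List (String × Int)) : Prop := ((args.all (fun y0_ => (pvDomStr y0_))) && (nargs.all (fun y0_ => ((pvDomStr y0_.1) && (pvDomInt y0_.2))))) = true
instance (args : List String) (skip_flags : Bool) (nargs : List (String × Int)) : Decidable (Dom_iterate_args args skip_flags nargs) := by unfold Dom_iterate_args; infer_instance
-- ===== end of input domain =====

-- B replaces A's one-pass pending-skip-counter loop by two staged passes (a materialized
-- consumed-position mask, then an enumerate filter); objective: alternative decomposition, same cost.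
-- A is a generator; the equivalence is about the list of yielded pairs.

-- ===== PORT A =====
-- the for-loop of A, recursing over the remaining args with the same state (idx, skip_next)
def iterateArgsLoop (skip_flags : Bool) (nargs : List (String × Int)) :
    List String → Nat → Int → List (Int × String)
  | [], _, _ => []
  | arg :: rest, idx, skip_next =>
    if skip_next > 0 then
      iterateArgsLoop skip_flags nargs rest (idx + 1) (skip_next - 1)
    else
      match (PySem.Dict.mk nargs).get? arg with   -- 'arg in nargs' / 'nargs[arg]'
      | some n => iterateArgsLoop skip_flags nargs rest (idx + 1) n
      | none =>
        if skip_flags && PySem.Str.startswith arg "-" then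
          iterateArgsLoop skip_flags nargs rest (idx + 1) skip_next
        else
          ((idx : Int), arg) :: iterateArgsLoop skip_flags nargs rest (idx + 1) skip_next

def iterate_args (args : List String) (skip_flags : Bool) (nargs : List (String × Int)) : List (Int × String) :=
  iterateArgsLoop skip_flags nargs args 0 0

-- ===== PORT B =====
-- stage 1 (Source B's consumed_mask while-loop, transcribed on the suffix args[i:]):
-- mark an option and its min(max(0,n), remaining) following arguments in one step
def consumedMask (nargs : List (String × Int)) : List String → List Bool
  | [] => []
  | arg :: rest =>
    match (PySem.Dict.mk nargs).get? arg with
    | some n =>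
      let kk := min n.toNat rest.length           -- min(max(0, nargs[arg]), n - i - 1)
      true :: (List.replicate kk true ++ consumedMask nargs (rest.drop kk))
    | none => false :: consumedMask nargs rest
termination_by xs => xs.length
decreasing_by all_goals (simp only [List.length_drop, List.length_cons]; omega)

-- stage 2: 'for idx, arg in enumerate(args): if not mask[idx] and not (...): yield idx, arg'
def enumFromNat (i : Nat) : List String → List (Nat × String)
  | [] => []
  | a :: rest => (i, a) :: enumFromNat (i + 1) rest

def stage2Loop (skip_flags : Bool) (mask : List Bool) : List (Nat × String) → List (Int × String)
  | [] => []
  | (idx, arg) :: rest =>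
    if !(mask.getD idx false) && !(skip_flags && PySem.Str.startswith arg "-") then
      ((idx : Int), arg) :: stage2Loop skip_flags mask rest
    else stage2Loop skip_flags mask rest

def iterate_args_alt (args : List String) (skip_flags : Bool) (nargs : List (String × Int)) : List (Int × String) :=
  stage2Loop skip_flags (consumedMask nargs args) (enumFromNat 0 args)

-- ===== PRECONDITION & SPEC =====
def Spec_iterate_args (args : List String) (skip_flags : Bool) (nargs : List (String × Int)) (out : List (Int × String)) : Prop := out = iterate_args_alt args skip_flags nargs
instance (args : List String) (skip_flags : Bool) (nargs : List (String × Int)) (out : List (Int × String)) : Decidable (Spec_iterate_args args skip_flags nargs out) := by unfold Spec_iterate_args; infer_instance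

-- ===== CLAIM (what is proved, stated in full; the proofs are below) =====
def Claim_equal_iterate_args : Prop := ∀ (args : List String) (skip_flags : Bool) (nargs : List (String × Int)), Dom_iterate_args args skip_flags nargs → Spec_iterate_args args skip_flags nargs (iterate_args args skip_flags nargs)

-- ===== LEMMAS AND PROOFS =====

theorem consumedMask_cons (nargs : List (String × Int)) (a : String) (rest : List String) :
    consumedMask nargs (a :: rest) =
      match (PySem.Dict.mk nargs).get? a with
      | some n => true :: (List.replicate (min n.toNat rest.length) true ++ consumedMask nargs (rest.drop (min n.toNat rest.length)))
      | none => false :: consumedMask nargs rest := by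
  rw [consumedMask.eq_def]

-- the mask has one entry per argument
theorem consumedMask_length (nargs : List (String × Int)) :
    ∀ (N : Nat) (xs : List String), xs.length ≤ N → (consumedMask nargs xs).length = xs.length := by
  intro N
  induction N with
  | zero =>
    intro xs h
    have : xs = [] := List.eq_nil_of_length_eq_zero (by omega)
    subst this; simp [consumedMask]
  | succ N ih =>
    intro xs h
    cases xs with
    | nil => simp [consumedMask]
    | cons a rest =>
      rw [consumedMask_cons]
      cases hg : (PySem.Dict.mk nargs).get? a with
      | some n =>
        simp only [List.length_cons, List.length_append, List.length_replicate,
          ih (rest.drop (min n.toNat rest.length)) (by simp at h ⊢; omega), List.length_drop]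
        omega
      | none =>
        simp only [List.length_cons, ih rest (by simp at h; omega)]

-- proof-only middle form: stage 2 rephrased in lockstep over (remaining args, remaining mask)
def lockstep (sf : Bool) : List String → List Bool → Nat → List (Int × String)
  | [], _, _ => []
  | _ :: _, [], _ => []
  | a :: rest, b :: ms, idx =>
    if !b && !(sf && PySem.Str.startswith a "-") then
      ((idx : Int), a) :: lockstep sf rest ms (idx + 1)
    else lockstep sf rest ms (idx + 1)

-- indexed stage-2 over enumFromNat idx equals the lockstep form on the mask suffix
theorem stage2_eq_lockstep (sf : Bool) :
    ∀ (xs : List String) (pre post : List Bool) (idx : Nat),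
      pre.length = idx → xs.length ≤ post.length →
      stage2Loop sf (pre ++ post) (enumFromNat idx xs) = lockstep sf xs post idx := by
  intro xs
  induction xs with
  | nil => intro pre post idx h hl; cases post <;> simp [enumFromNat, stage2Loop, lockstep]
  | cons a rest ih =>
    intro pre post idx h hl
    cases post with
    | nil => simp at hl
    | cons b ms =>
      have hget : (pre ++ b :: ms)[idx]? = some b := by
        rw [← h, List.getElem?_append_right le_rfl]
        simp
      simp only [enumFromNat, stage2Loop, lockstep, List.getD_eq_getElem?_getD, hget,
        Option.getD_some]
      have hpre : (pre ++ [b]).length = idx + 1 := by simp [h]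
      have hassoc : pre ++ b :: ms = (pre ++ [b]) ++ ms := by simp
      rw [hassoc, ih (pre ++ [b]) ms (idx + 1) hpre (by simpa using hl)]

-- lockstep over kk 'true' mask entries just drops kk elements
theorem lockstep_replicate_true (sf : Bool) :
    ∀ (kk : Nat) (xs : List String) (ms : List Bool) (idx : Nat), kk ≤ xs.length →
      lockstep sf xs (List.replicate kk true ++ ms) idx = lockstep sf (xs.drop kk) ms (idx + kk) := by
  intro kk
  induction kk with
  | zero => intro xs ms idx _; simp
  | succ k ih =>
    intro xs ms idx h
    cases xs with
    | nil => simp at h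
    | cons a rest =>
      simp only [List.replicate_succ, List.cons_append, lockstep, List.drop]
      rw [if_neg (by simp)]
      rw [ih rest ms (idx + 1) (by simpa using h)]
      congr 1
      omega

-- a positive pending skip of k in A's loop just drops k elements (and advances idx by k)
theorem aLoop_skip (skip_flags : Bool) (nargs : List (String × Int)) :
    ∀ (k : Nat) (xs : List String) (idx : Nat),
      iterateArgsLoop skip_flags nargs xs idx (k : Int) =
        iterateArgsLoop skip_flags nargs (xs.drop k) (idx + k) 0 := by
  intro k
  induction k with
  | zero => intro xs idx; simp
  | succ k ih =>
    intro xs idx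
    cases xs with
    | nil => simp [iterateArgsLoop]
    | cons a rest =>
      rw [iterateArgsLoop, if_pos (by omega : ((k + 1 : Nat) : Int) > 0)]
      have h1 : ((k + 1 : Nat) : Int) - 1 = (k : Int) := by omega
      rw [h1, ih rest (idx + 1)]
      have h2 : idx + 1 + k = idx + (k + 1) := by omega
      simp [List.drop, h2]

-- with no pending skip (state ≤ 0), A's loop is lockstep over B's consumed mask
theorem aLoop_eq_lockstep (sf : Bool) (nargs : List (String × Int)) :
    ∀ (N : Nat) (xs : List String), xs.length ≤ N → ∀ (idx : Nat) (s : Int), s ≤ 0 →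
      iterateArgsLoop sf nargs xs idx s = lockstep sf xs (consumedMask nargs xs) idx := by
  intro N
  induction N with
  | zero =>
    intro xs hN idx s hs
    have : xs = [] := List.eq_nil_of_length_eq_zero (by omega)
    subst this
    simp [iterateArgsLoop, lockstep]
  | succ N ih =>
    intro xs hN idx s hs
    cases xs with
    | nil => simp [iterateArgsLoop, lockstep]
    | cons a rest =>
      have hrest : rest.length ≤ N := by simp at hN; omega
      rw [iterateArgsLoop, if_neg (by omega), consumedMask_cons]
      cases hg : (PySem.Dict.mk nargs).get? a with
      | some n =>
        simp only
        rw [lockstep, if_neg (by simp)]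
        by_cases hk : n.toNat ≤ rest.length
        · have hkk : min n.toNat rest.length = n.toNat := by omega
          rw [hkk, lockstep_replicate_true sf n.toNat rest _ (idx + 1) hk]
          by_cases hn : n ≤ 0
          · have h0 : n.toNat = 0 := Int.toNat_of_nonpos hn
            rw [h0]
            simp only [List.drop_zero, Nat.add_zero]
            exact ih rest hrest (idx + 1) n hn
          · have hrepr : n = ((n.toNat : Nat) : Int) := by omega
            rw [hrepr, aLoop_skip]
            exact ih (rest.drop n.toNat) (by simp [List.length_drop]; omega) (idx + 1 + n.toNat) 0 le_rfl
        · -- the skip runs past the end of the list: both sides reach the empty suffix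
          have hkk : min n.toNat rest.length = rest.length := by omega
          rw [hkk, lockstep_replicate_true sf rest.length rest _ (idx + 1) le_rfl]
          have hdrop : rest.drop rest.length = [] := by simp
          rw [hdrop]
          have hrepr : n = ((n.toNat : Nat) : Int) := by omega
          rw [hrepr, aLoop_skip]
          have hdrop2 : rest.drop n.toNat = [] := List.drop_eq_nil_of_le (by omega)
          rw [hdrop2]
          simp [iterateArgsLoop, lockstep]
      | none =>
        simp only
        rw [lockstep]
        simp only [Bool.not_false, Bool.true_and]
        by_cases hf : (sf && PySem.Str.startswith a "-") = true
        · rw [if_pos hf, if_neg (by rw [hf]; simp), ih rest hrest (idx + 1) s hs]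
        · have hf' : (sf && PySem.Str.startswith a "-") = false := by
            revert hf; cases (sf && PySem.Str.startswith a "-") <;> simp
          rw [if_neg hf, if_pos (by rw [hf']; simp), ih rest hrest (idx + 1) s hs]

-- ===== VERDICT (by name: the statement is the Claim_ definition above) =====
theorem iterate_args_spec : Claim_equal_iterate_args := by
  intro args skip_flags nargs _
  unfold Spec_iterate_args iterate_args iterate_args_alt
  rw [aLoop_eq_lockstep skip_flags nargs args.length args le_rfl 0 0 le_rfl]
  rw [← stage2_eq_lockstep skip_flags args [] (consumedMask nargs args) 0 rfl
        (le_of_eq (consumedMask_length nargs args.length args le_rfl).symm)]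
  simp
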